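-- pv_equiv track=rewrite | github.com/apoorvaholkar/AgriAssist | server/vegetation/app.py | detect_recent_vegetation_cycle
-- ===== SOURCE A (Python) =====
-- def detect_recent_vegetation_cycle(ndvi_analysis, max_allowed_other_vegetations=5):
--     recent_cycle = []
--     other_vegetation_count = 0
--
--     for entry in ndvi_analysis:
--         if entry['ndvi_score'] == 'low to average vegetation':
--             if recent_cycle and other_vegetation_count <= max_allowed_other_vegetations:
--                 recent_cycle.append(entry)
--                 other_vegetation_count = 0  # Reset the count after finding the cycle end
--             else:
--                 recent_cycle = [entry]
--                 other_vegetation_count = 0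
--         else:
--             if recent_cycle:
--                 other_vegetation_count += 1
--                 if other_vegetation_count > max_allowed_other_vegetations:
--                     recent_cycle = []  # Reset the cycle if max allowed other vegetations exceeded
--             else:
--                 other_vegetation_count = 0
--     return bool(recent_cycle)
-- ===== SOURCE B (Python) =====
-- def detect_recent_vegetation_cycle(ndvi_analysis, max_allowed_other_vegetations=5):
--     # The result depends only on the position of the LAST 'low to average vegetation'
--     # entry: a cycle survives iff the number of trailing other entries is 0 or within
--     # the allowed budget.  Build the flag table first (forcing every key access, in
--     # forward order, like A does), then scan it from the end.
--     flags = [entry['ndvi_score'] == 'low to average vegetation' for entry in ndvi_analysis]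
--     for k, is_cycle in enumerate(reversed(flags)):
--         if is_cycle:
--             return k == 0 or k <= max_allowed_other_vegetations
--     return False
-- ===== Notes on version B (the rewrite author's own statement) =====
-- stated objective: simpler
-- what changed: Replaces A's running recent_cycle-list/counter state machine with building the boolean flag list once (forcing every key access in forward order) and a single reverse scan that decides from the position of the last low-vegetation entry.
import Mathlib
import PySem

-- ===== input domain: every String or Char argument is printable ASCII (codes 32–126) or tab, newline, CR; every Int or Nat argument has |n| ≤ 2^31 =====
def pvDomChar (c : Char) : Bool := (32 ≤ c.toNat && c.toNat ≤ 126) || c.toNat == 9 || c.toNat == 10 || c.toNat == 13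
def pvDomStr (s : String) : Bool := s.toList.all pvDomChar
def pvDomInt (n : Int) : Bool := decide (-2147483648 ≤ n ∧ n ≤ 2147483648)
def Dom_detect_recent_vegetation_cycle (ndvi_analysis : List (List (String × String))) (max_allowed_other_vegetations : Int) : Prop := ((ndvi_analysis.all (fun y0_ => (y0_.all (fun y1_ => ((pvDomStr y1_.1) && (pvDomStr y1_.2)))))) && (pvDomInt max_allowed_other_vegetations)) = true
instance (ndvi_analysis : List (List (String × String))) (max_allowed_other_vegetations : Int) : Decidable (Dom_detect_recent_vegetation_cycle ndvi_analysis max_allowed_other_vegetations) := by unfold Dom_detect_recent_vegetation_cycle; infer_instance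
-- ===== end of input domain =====

-- B replaces A's running cycle-list/counter state machine by building the flag table once
-- and scanning it from the end (simpler decomposition; same asymptotic cost).

-- shared dict access: entry['ndvi_score'] — first match in the association list;
-- Python raises KeyError when the key is absent, which Pre_ excludes, so the
-- default "" is never reached on admitted inputs.
def pvLookup (entry : List (String × String)) (k : String) : String :=
  ((entry.find? (fun p => p.1 == k)).map Prod.snd).getD ""

-- ===== PORT A =====
-- one loop iteration of A: state = (recent_cycle, other_vegetation_count)
def stepA (m : Int) (s : List (List (String × String)) × Int)
    (entry : List (String × String)) : List (List (String × String)) × Int :=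
  if pvLookup entry "ndvi_score" == "low to average vegetation" then
    if s.1 ≠ [] ∧ s.2 ≤ m then (s.1 ++ [entry], 0) else ([entry], 0)
  else
    if s.1 ≠ [] then
      if s.2 + 1 > m then ([], s.2 + 1) else (s.1, s.2 + 1)
    else (s.1, 0)

def detect_recent_vegetation_cycle (ndvi_analysis : List (List (String × String))) (max_allowed_other_vegetations : Int) : Bool :=
  decide ((ndvi_analysis.foldl (stepA max_allowed_other_vegetations) ([], 0)).1 ≠ [])

-- ===== PORT B =====
def flagB (entry : List (String × String)) : Bool :=
  pvLookup entry "ndvi_score" == "low to average vegetation"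

-- 'for k, is_cycle in enumerate(reversed(flags)): if is_cycle: return k == 0 or k <= max'
def scanB (m : Int) : List Bool → Nat → Bool
  | [], _ => false
  | f :: rest, k => if f then (decide (k = 0) || decide ((k : Int) ≤ m)) else scanB m rest (k + 1)

def detect_recent_vegetation_cycle_alt (ndvi_analysis : List (List (String × String))) (max_allowed_other_vegetations : Int) : Bool :=
  scanB max_allowed_other_vegetations ((ndvi_analysis.map flagB).reverse) 0

-- ===== PRECONDITION & SPEC =====
-- Pre_ excludes exactly the inputs where A raises KeyError: an entry without the key 'ndvi_score'.
def Pre_detect_recent_vegetation_cycle (ndvi_analysis : List (List (String × String))) (max_allowed_other_vegetations : Int) : Prop :=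
  ∀ e ∈ ndvi_analysis, "ndvi_score" ∈ e.map Prod.fst
instance (ndvi_analysis : List (List (String × String))) (max_allowed_other_vegetations : Int) : Decidable (Pre_detect_recent_vegetation_cycle ndvi_analysis max_allowed_other_vegetations) := by unfold Pre_detect_recent_vegetation_cycle; infer_instance

def pvWitness_detect_recent_vegetation_cycle : (List (List (String × String))) × Int :=
  ([[("ndvi_score", "low to average vegetation")], [("ndvi_score", "dense vegetation")]], 5)

def Spec_detect_recent_vegetation_cycle (ndvi_analysis : List (List (String × String))) (max_allowed_other_vegetations : Int) (out : Bool) : Prop := out = detect_recent_vegetation_cycle_alt ndvi_analysis max_allowed_other_vegetations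
instance (ndvi_analysis : List (List (String × String))) (max_allowed_other_vegetations : Int) (out : Bool) : Decidable (Spec_detect_recent_vegetation_cycle ndvi_analysis max_allowed_other_vegetations out) := by unfold Spec_detect_recent_vegetation_cycle; infer_instance

-- ===== CLAIM (what is proved, stated in full; the proofs are below) =====
def Claim_equal_detect_recent_vegetation_cycle : Prop := ∀ (ndvi_analysis : List (List (String × String))) (max_allowed_other_vegetations : Int), Dom_detect_recent_vegetation_cycle ndvi_analysis max_allowed_other_vegetations → Pre_detect_recent_vegetation_cycle ndvi_analysis max_allowed_other_vegetations → Spec_detect_recent_vegetation_cycle ndvi_analysis max_allowed_other_vegetations (detect_recent_vegetation_cycle ndvi_analysis max_allowed_other_vegetations)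

-- ===== LEMMAS AND PROOFS =====

-- abstract state machine over the flags only: (recent_cycle ≠ [], counter)
def gAbs (m : Int) (s : Bool × Int) (f : Bool) : Bool × Int :=
  if f then (true, 0)
  else if s.1 then (if s.2 + 1 > m then (false, s.2 + 1) else (true, s.2 + 1))
  else (false, 0)

-- A's fold, abstracted to (nonemptiness, counter), is the gAbs fold over the flags
lemma foldA_abs (m : Int) (l : List (List (String × String))) :
    ∀ rc c, (decide ((l.foldl (stepA m) (rc, c)).1 ≠ []), (l.foldl (stepA m) (rc, c)).2)
      = (l.map flagB).foldl (gAbs m) (decide (rc ≠ []), c) := by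
  induction l with
  | nil => intro rc c; simp
  | cons e t ih =>
    intro rc c
    simp only [List.foldl_cons, List.map_cons]
    have hstep : ∀ s : List (List (String × String)) × Int,
        (decide ((stepA m s e).1 ≠ []), (stepA m s e).2)
          = gAbs m (decide (s.1 ≠ []), s.2) (flagB e) := by
      intro s
      simp only [stepA, gAbs, flagB]
      split_ifs with h1 h2 h3 h4 h5 <;> simp_all
    rw [← hstep (rc, c)]
    exact ih (stepA m (rc, c) e).1 (stepA m (rc, c) e).2

-- number of falses before the first true (= trailing-other count on the reversed flags)
def tcF : List Bool → Option Nat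
  | [] => none
  | f :: r => if f then some 0 else (tcF r).map (· + 1)

lemma scanB_char (m : Int) (l : List Bool) :
    ∀ k, scanB m l k = match tcF l with
      | none => false
      | some j => (decide (k + j = 0) || decide (((k + j : Nat) : Int) ≤ m)) := by
  induction l with
  | nil => intro k; simp [scanB, tcF]
  | cons f r ih =>
    intro k
    simp only [scanB, tcF]
    by_cases hf : f
    · simp [hf]
    · simp only [hf]
      rw [ih (k + 1)]
      cases tcF r with
      | none => simp
      | some j =>
        simp only [Bool.false_eq_true, if_false, Option.map_some]
        have e1 : k + 1 + j = k + (j + 1) := by omega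
        rw [e1]

lemma foldG_char (m : Int) (l : List Bool) :
    match tcF l.reverse with
    | none => (l.foldl (gAbs m) (false, 0)).1 = false
    | some j => (l.foldl (gAbs m) (false, 0)).1 = (decide (j = 0) || decide ((j : Int) ≤ m))
        ∧ ((l.foldl (gAbs m) (false, 0)).1 = true → (l.foldl (gAbs m) (false, 0)).2 = (j : Int)) := by
  induction l using List.reverseRecOn with
  | nil => simp [tcF]
  | append_singleton t f ih =>
    rw [List.foldl_append]
    simp only [List.reverse_append, List.reverse_cons, List.reverse_nil, List.nil_append,
      List.cons_append, List.foldl_cons, List.foldl_nil]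
    by_cases hf : f
    · simp [hf, gAbs, tcF]
    · simp only [hf, tcF]
      cases htc : tcF t.reverse with
      | none =>
        rw [htc] at ih
        simp only [Option.map_none]
        simp [gAbs, ih]
      | some j =>
        rw [htc] at ih
        obtain ⟨h1, h2⟩ := ih
        simp only [Option.map_some]
        by_cases hb : (t.foldl (gAbs m) (false, 0)).1
        · have hc : (t.foldl (gAbs m) (false, 0)).2 = (j : Int) := h2 hb
          simp only [gAbs, hb, if_true, hc]
          by_cases hjm : (j : Int) + 1 > m
          · rw [if_pos hjm]
            exact ⟨by simp <;> omega, fun h => absurd h (by simp)⟩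
          · rw [if_neg hjm]
            exact ⟨by simp <;> omega, fun _ => by simp⟩
        · have hbf : (t.foldl (gAbs m) (false, 0)).1 = false := by
            cases h : (t.foldl (gAbs m) (false, 0)).1 <;> simp_all
          rw [hbf] at h1
          have hjm : ¬ ((j : Int) ≤ m) := by
            intro h; rw [decide_eq_true h] at h1; simp at h1
          simp only [gAbs, hbf, Bool.false_eq_true, if_false]
          exact ⟨by simp <;> omega, fun h => absurd h (by simp)⟩

-- ===== VERDICT (by name: the statement is the Claim_ definition above) =====
theorem detect_recent_vegetation_cycle_spec : Claim_equal_detect_recent_vegetation_cycle := by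
  intro l m _ _
  unfold Spec_detect_recent_vegetation_cycle detect_recent_vegetation_cycle detect_recent_vegetation_cycle_alt
  have hA := foldA_abs m l [] 0
  have hA1 : decide ((l.foldl (stepA m) ([], 0)).1 ≠ [])
      = ((l.map flagB).foldl (gAbs m) (false, 0)).1 := by
    have := congrArg Prod.fst hA
    simpa using this
  rw [hA1, scanB_char m ((l.map flagB).reverse) 0]
  have hG := foldG_char m (l.map flagB)
  cases htc : tcF (l.map flagB).reverse with
  | none => rw [htc] at hG; simp [hG]
  | some j =>
    rw [htc] at hG
    simp only [Nat.zero_add]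
    exact hG.1
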